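-- pv_equiv track=rewrite | github.com/iluvjava/Math-381-Project-2 | filter_upper.py | trim_line
-- ===== SOURCE A (Python) =====
-- from string import ascii_letters
--
-- def trim_line(s:str, IgnoreCapitalzedWord=False):
--     if IgnoreCapitalzedWord:
--         s = ' '.join([word for word in s.split() if word[0].islower()])
--     Res = ""
--     for c in s:
--         if c == "\'":
--             continue
--         Res += c if c in ascii_letters else (" " if len(Res) >= 1 and Res[-1] != ' ' else "")
--     return Res.lower()
-- ===== SOURCE B (Python) =====
-- from string import ascii_letters
--
-- def trim_line(s, IgnoreCapitalzedWord=False):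
--     if IgnoreCapitalzedWord:
--         s = ' '.join([word for word in s.split() if word[0].islower()])
--     s = ''.join(c for c in s if c != "'")
--     out = []
--     i, n = 0, len(s)
--     while i < n:
--         c = s[i]
--         if c in ascii_letters:
--             out.append(c.lower())
--             i += 1
--         else:
--             out.append(' ')
--             i += 1
--             while i < n and s[i] not in ascii_letters:
--                 i += 1
--     if out and out[0] == ' ':
--         del out[0]
--     return ''.join(out)
-- ===== Notes on version B (the rewrite author's own statement) =====
-- stated objective: alternative
-- what changed: A builds the result char-by-char, deciding whether to emit a separator by inspecting the last character already appended (Res[-1]) and lowercasing at the end; B first deletes apostrophes, then does a single forward scan that emits each letter lowercased and collapses every maximal run of non-letters to one space by skipping the rest of the run with an inner loop, finally dropping the single leading space.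
import Mathlib
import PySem

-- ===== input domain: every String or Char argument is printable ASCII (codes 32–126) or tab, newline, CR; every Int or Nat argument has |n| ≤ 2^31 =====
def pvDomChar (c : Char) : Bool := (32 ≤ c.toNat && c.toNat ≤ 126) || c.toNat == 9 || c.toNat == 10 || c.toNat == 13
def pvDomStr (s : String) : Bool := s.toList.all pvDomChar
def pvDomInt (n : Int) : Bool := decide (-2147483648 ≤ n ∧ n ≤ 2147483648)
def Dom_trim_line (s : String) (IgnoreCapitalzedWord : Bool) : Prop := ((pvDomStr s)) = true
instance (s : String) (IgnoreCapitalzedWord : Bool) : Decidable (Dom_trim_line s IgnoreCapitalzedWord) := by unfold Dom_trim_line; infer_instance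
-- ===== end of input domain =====

-- B replaces A's append-with-lookback loop (Res[-1] check) by: delete apostrophes, then collapse each
-- maximal non-letter run to one space in a single forward scan, then drop one leading space (objective: alternative).

-- ===== PORT A =====
-- 'c in ascii_letters'
def pvIsAL (c : Char) : Bool := ('a' ≤ c && c ≤ 'z') || ('A' ≤ c && c ≤ 'Z')

-- the IgnoreCapitalzedWord preprocessing line, identical in A and B:
-- s = ' '.join([word for word in s.split() if word[0].islower()])
def pvKeepWord (w : List Char) : Bool :=
  match PySem.List.pyGet? w (0 : Int) with
  | some c => PySem.Chars.islower c
  | none => false   -- unreachable totality guard: s.split() yields no empty word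
def pvPreprocess (s : String) (flag : Bool) : List Char :=
  if flag then PySem.Chars.join [' '] ((PySem.Chars.split₀ s.toList).filter pvKeepWord)
  else s.toList

def trim_line (s : String) (IgnoreCapitalzedWord : Bool) : String :=
  String.mk (PySem.Chars.lower
    ((pvPreprocess s IgnoreCapitalzedWord).foldl
      (fun Res c =>
        if c = '\'' then Res
        else Res ++ (if pvIsAL c then [c]
                     else if 1 ≤ Res.length ∧ Res.getLast? ≠ some ' ' then [' '] else []))
      []))

-- ===== PORT B =====
-- the scan loop of Source B: letters are lowered and kept, a non-letter emits one ' ' and the inner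
-- while-loop skips the rest of the non-letter run
def pvCollapse : List Char → List Char
  | [] => []
  | c :: t =>
    if pvIsAL c then PySem.Chars.lowerChar c :: pvCollapse t
    else ' ' :: pvCollapse (t.dropWhile (fun d => !pvIsAL d))
termination_by l => l.length
decreasing_by
  · simp
  · have := List.length_dropWhile_le (fun d => !pvIsAL d) t
    simp
    omega

-- 'if out and out[0] == ' ': del out[0]'
def pvLstrip1 : List Char → List Char
  | ' ' :: t => t
  | l => l

def trim_line_alt (s : String) (IgnoreCapitalzedWord : Bool) : String :=
  String.mk (pvLstrip1 (pvCollapse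
    ((pvPreprocess s IgnoreCapitalzedWord).filter (fun c => c ≠ '\''))))

-- ===== PRECONDITION & SPEC =====
def Spec_trim_line (s : String) (IgnoreCapitalzedWord : Bool) (out : String) : Prop := out = trim_line_alt s IgnoreCapitalzedWord
instance (s : String) (IgnoreCapitalzedWord : Bool) (out : String) : Decidable (Spec_trim_line s IgnoreCapitalzedWord out) := by unfold Spec_trim_line; infer_instance

-- ===== CLAIM (what is proved, stated in full; the proofs are below) =====
def Claim_equal_trim_line : Prop := ∀ (s : String) (IgnoreCapitalzedWord : Bool), Dom_trim_line s IgnoreCapitalzedWord → Spec_trim_line s IgnoreCapitalzedWord (trim_line s IgnoreCapitalzedWord)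

-- ===== LEMMAS AND PROOFS =====

-- abstract form of A's loop body, indexed by the Boolean 'Res is nonempty and does not end in a space'
def pvF (b : Bool) : List Char → List Char
  | [] => []
  | c :: t =>
    if c = '\'' then pvF b t
    else if pvIsAL c then c :: pvF true t
    else if b then ' ' :: pvF false t
    else pvF false t

def pvCan (Res : List Char) : Bool := decide (1 ≤ Res.length ∧ Res.getLast? ≠ some ' ')

theorem pvCan_concat (Res : List Char) (c : Char) : pvCan (Res ++ [c]) = decide (c ≠ ' ') := by
  simp [pvCan]

theorem foldlA_eq_pvF (l : List Char) : ∀ Res : List Char,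
    l.foldl
      (fun Res c =>
        if c = '\'' then Res
        else Res ++ (if pvIsAL c then [c]
                     else if 1 ≤ Res.length ∧ Res.getLast? ≠ some ' ' then [' '] else []))
      Res = Res ++ pvF (pvCan Res) l := by
  induction l with
  | nil => intro Res; simp [pvF]
  | cons c t ih =>
    intro Res
    by_cases hq : c = '\''
    · simp [hq, pvF, ih]
    · by_cases hl : pvIsAL c
      · have hc : c ≠ ' ' := by
          intro h; subst h; simp [pvIsAL] at hl
        simp [List.foldl_cons, hq, hl, ih, pvCan_concat, hc, pvF]
      · by_cases hb : pvCan Res = true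
        · have hcond : 1 ≤ Res.length ∧ Res.getLast? ≠ some ' ' := by
            simpa [pvCan] using hb
          simp [List.foldl_cons, hq, hl, hcond, ih, pvCan_concat, pvF, hb]
        · have hcond : ¬ (1 ≤ Res.length ∧ Res.getLast? ≠ some ' ') := by
            simpa [pvCan] using hb
          have hb' : pvCan Res = false := by simpa using hb
          simp [List.foldl_cons, hq, hl, hcond, ih, pvF, hb']

theorem pvIsAL_lowerChar_ne_space {c : Char} (h : pvIsAL c = true) :
    PySem.Chars.lowerChar c ≠ ' ' := by
  intro hEq
  unfold PySem.Chars.lowerChar at hEq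
  by_cases hu : PySem.Chars.isupper c = true
  · rw [if_pos hu] at hEq
    simp [PySem.Chars.isupper] at hu
    have h1 : 'A'.toNat ≤ c.toNat := Fin.mk_le_mk.mp hu.1
    have h2 : c.toNat ≤ 'Z'.toNat := Fin.mk_le_mk.mp hu.2
    have e1 : 'A'.toNat = 65 := by decide
    have e2 : 'Z'.toNat = 90 := by decide
    have hv : (c.toNat + 32).isValidChar := Or.inl (by omega)
    apply_fun Char.toNat at hEq
    rw [Char.toNat_ofNat, if_pos hv] at hEq
    have e3 : (' ').toNat = 32 := by decide
    omega
  · rw [if_neg hu] at hEq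
    subst hEq
    exact absurd h (by decide)

theorem pvLstrip1_cons_ne {x : Char} (hx : x ≠ ' ') (l : List Char) :
    pvLstrip1 (x :: l) = x :: l := by
  unfold pvLstrip1
  split
  · rename_i t h
    rw [List.cons.injEq] at h
    exact absurd h.1 hx
  · rfl

theorem pvLstrip1_space (l : List Char) : pvLstrip1 (' ' :: l) = l := rfl

theorem pvLower_cons (a : Char) (l : List Char) :
    PySem.Chars.lower (a :: l) = PySem.Chars.lowerChar a :: PySem.Chars.lower l := by
  simp [PySem.Chars.lower]

theorem pvCollapse_dropWhile (m : List Char) :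
    pvCollapse (m.dropWhile (fun d => !pvIsAL d)) = pvLstrip1 (pvCollapse m) := by
  cases m with
  | nil => simp [pvCollapse, pvLstrip1]
  | cons c t =>
    by_cases hl : pvIsAL c
    · rw [List.dropWhile_cons_of_neg (by simp [hl])]
      have ec : pvCollapse (c :: t) = PySem.Chars.lowerChar c :: pvCollapse t := by
        simp [pvCollapse, hl]
      rw [ec, pvLstrip1_cons_ne (pvIsAL_lowerChar_ne_space hl)]
    · rw [List.dropWhile_cons_of_pos (by simp [hl])]
      have ec : pvCollapse (c :: t) = ' ' :: pvCollapse (t.dropWhile (fun d => !pvIsAL d)) := by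
        simp [pvCollapse, hl]
      rw [ec, pvLstrip1_space]

theorem pvF_eq_collapse (l : List Char) :
    PySem.Chars.lower (pvF true l) = pvCollapse (l.filter (fun c => c ≠ '\'')) ∧
    PySem.Chars.lower (pvF false l) = pvLstrip1 (pvCollapse (l.filter (fun c => c ≠ '\''))) := by
  induction l with
  | nil => simp [pvF, pvCollapse, pvLstrip1, PySem.Chars.lower]
  | cons c t ih =>
    obtain ⟨ih1, ih2⟩ := ih
    by_cases hq : c = '\''
    · have hfil : (c :: t).filter (fun c => decide (c ≠ '\'')) = t.filter (fun c => decide (c ≠ '\'')) :=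
        List.filter_cons_of_neg (by simp [hq])
      constructor
      · rw [show pvF true (c :: t) = pvF true t from by simp [pvF, hq], hfil]; exact ih1
      · rw [show pvF false (c :: t) = pvF false t from by simp [pvF, hq], hfil]; exact ih2
    · have hfil : (c :: t).filter (fun c => decide (c ≠ '\'')) = c :: t.filter (fun c => decide (c ≠ '\'')) :=
        List.filter_cons_of_pos (by simp [hq])
      by_cases hl : pvIsAL c
      · have ec : pvCollapse (c :: t.filter (fun c => decide (c ≠ '\''))) =
            PySem.Chars.lowerChar c :: pvCollapse (t.filter (fun c => decide (c ≠ '\''))) := by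
          simp [pvCollapse, hl]
        constructor
        · rw [show pvF true (c :: t) = c :: pvF true t from by simp [pvF, hq, hl],
            pvLower_cons, ih1, hfil, ec]
        · rw [show pvF false (c :: t) = c :: pvF true t from by simp [pvF, hq, hl],
            pvLower_cons, ih1, hfil, ec,
            pvLstrip1_cons_ne (pvIsAL_lowerChar_ne_space hl)]
      · have ec : pvCollapse (c :: t.filter (fun c => decide (c ≠ '\''))) =
            ' ' :: pvCollapse ((t.filter (fun c => decide (c ≠ '\''))).dropWhile (fun d => !pvIsAL d)) := by
          simp [pvCollapse, hl]
        constructor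
        · rw [show pvF true (c :: t) = ' ' :: pvF false t from by simp [pvF, hq, hl],
            pvLower_cons, show PySem.Chars.lowerChar ' ' = ' ' from by decide,
            ih2, hfil, ec, pvCollapse_dropWhile]
        · rw [show pvF false (c :: t) = pvF false t from by simp [pvF, hq, hl],
            ih2, hfil, ec, pvLstrip1_space, pvCollapse_dropWhile]

-- ===== VERDICT (by name: the statement is the Claim_ definition above) =====
theorem trim_line_spec : Claim_equal_trim_line := by
  intro s flag _
  unfold Spec_trim_line trim_line trim_line_alt
  rw [foldlA_eq_pvF]
  have hcan : pvCan ([] : List Char) = false := by decide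
  rw [hcan, List.nil_append, (pvF_eq_collapse (pvPreprocess s flag)).2]
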